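-- pv_equiv track=rewrite | github.com/Minoo7/TDDE24 | tenta/2019_08_20/cod.py | find_least_close_r
-- ===== SOURCE A (Python) =====
-- def find_least_close_r(seq1, seq2):
--     if not seq1:
--         return []
--     def inner(furth, comp_seq):
--         if not comp_seq:
--             return [furth]
--         num = seq1[0]
--         comp_val1, comp_val2 = abs(num-comp_seq[0]), abs(num-furth)
--         if comp_val1 > comp_val2 or (comp_val1 == comp_val2 and comp_seq[0] > furth):
--             return inner(comp_seq[0], comp_seq[1:])
--         return inner(furth, comp_seq[1:])
--     return inner(seq2[0], seq2[1:]) + find_least_close_r(seq1[1:], seq2)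
-- ===== SOURCE B (Python) =====
-- def find_least_close_r(seq1, seq2):
--     res = []
--     for num in seq1:
--         best = seq2[0]
--         for x in seq2[1:]:
--             if abs(num - x) > abs(num - best) or (abs(num - x) == abs(num - best) and x > best):
--                 best = x
--         res.append(best)
--     return res
-- ===== Notes on version B (the rewrite author's own statement) =====
-- stated objective: faster
-- what changed: Replaces the double recursion (outer recursion over seq1, inner accumulator recursion over seq2, each step copying the tail with [1:]) with two nested for-loops keeping a running best, so no per-step list slicing.
import Mathlib
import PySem

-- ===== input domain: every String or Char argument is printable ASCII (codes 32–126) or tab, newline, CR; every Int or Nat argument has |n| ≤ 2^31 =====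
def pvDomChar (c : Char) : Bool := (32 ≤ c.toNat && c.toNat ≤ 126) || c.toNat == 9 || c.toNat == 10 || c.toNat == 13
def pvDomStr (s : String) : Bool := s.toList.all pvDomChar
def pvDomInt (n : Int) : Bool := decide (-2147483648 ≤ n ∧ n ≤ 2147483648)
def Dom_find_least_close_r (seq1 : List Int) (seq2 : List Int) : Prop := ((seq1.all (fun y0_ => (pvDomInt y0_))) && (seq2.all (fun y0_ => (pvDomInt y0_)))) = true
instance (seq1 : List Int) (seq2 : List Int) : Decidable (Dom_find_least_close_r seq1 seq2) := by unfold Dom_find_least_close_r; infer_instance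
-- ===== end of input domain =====

-- B replaces A's double recursion by two nested loops (fold over seq2 keeping a running best, map over seq1); objective: simpler.


-- ===== PORT A =====
-- A's inner recursion: carries the current furthest 'furth' down comp_seq.
def find_least_close_r_inner (num : Int) (furth : Int) (comp_seq : List Int) : List Int :=
  match comp_seq with
  | [] => [furth]
  | c :: rest =>
    if |num - c| > |num - furth| ∨ (|num - c| = |num - furth| ∧ c > furth) then
      find_least_close_r_inner num c rest
    else
      find_least_close_r_inner num furth rest

def find_least_close_r (seq1 : List Int) (seq2 : List Int) : List Int :=
  match seq1 with
  | [] => []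
  | num :: rest =>
    -- seq2[0] raises IndexError in Python when seq2 = []; that input is excluded by Pre_.
    match seq2 with
    | [] => []
    | h :: t => find_least_close_r_inner num h t ++ find_least_close_r rest seq2

-- ===== PORT B =====
-- B's inner loop: best = seq2[0], then fold over seq2[1:].
def flc_best (num : Int) (best : Int) (xs : List Int) : Int :=
  xs.foldl (fun b x =>
    if |num - x| > |num - b| ∨ (|num - x| = |num - b| ∧ x > b) then x else b) best

def find_least_close_r_alt (seq1 : List Int) (seq2 : List Int) : List Int :=
  seq1.foldl (fun res num =>
    match seq2 with
    | [] => res  -- Python raises IndexError here (seq2[0]); excluded by Pre_.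
    | h :: t => res ++ [flc_best num h t]) []

-- ===== PRECONDITION & SPEC =====
-- Pre_ excludes the inputs where seq1 is nonempty and seq2 is empty: there both A and B raise IndexError (seq2[0]).
def Pre_find_least_close_r (seq1 : List Int) (seq2 : List Int) : Prop := seq1 = [] ∨ seq2 ≠ []
instance (seq1 : List Int) (seq2 : List Int) : Decidable (Pre_find_least_close_r seq1 seq2) := by unfold Pre_find_least_close_r; infer_instance
def pvWitness_find_least_close_r : List Int × List Int := ([1, 5, -3], [2, -7, 7])

def Spec_find_least_close_r (seq1 : List Int) (seq2 : List Int) (out : List Int) : Prop := out = find_least_close_r_alt seq1 seq2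
instance (seq1 : List Int) (seq2 : List Int) (out : List Int) : Decidable (Spec_find_least_close_r seq1 seq2 out) := by unfold Spec_find_least_close_r; infer_instance

-- ===== CLAIM (what is proved, stated in full; the proofs are below) =====
def Claim_equal_find_least_close_r : Prop := ∀ (seq1 : List Int) (seq2 : List Int), Dom_find_least_close_r seq1 seq2 → Pre_find_least_close_r seq1 seq2 → Spec_find_least_close_r seq1 seq2 (find_least_close_r seq1 seq2)

-- ===== LEMMAS AND PROOFS =====
-- A's inner recursion computes exactly B's fold, wrapped in a singleton list.
theorem flc_inner_eq_best (num : Int) (furth : Int) (comp_seq : List Int) :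
    find_least_close_r_inner num furth comp_seq = [flc_best num furth comp_seq] := by
  induction comp_seq generalizing furth with
  | nil => rfl
  | cons c rest ih =>
    simp only [find_least_close_r_inner, flc_best, List.foldl_cons]
    split_ifs with h <;> simp_all [flc_best]

-- B's outer fold with an append accumulator is acc ++ map.
theorem flc_alt_foldl (h : Int) (t : List Int) (seq1 : List Int) (acc : List Int) :
    seq1.foldl (fun res num =>
      match h :: t with
      | [] => res
      | h' :: t' => res ++ [flc_best num h' t']) acc
    = acc ++ seq1.map (fun num => flc_best num h t) := by
  induction seq1 generalizing acc with
  | nil => simp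
  | cons n rest ih => simp [ih]

-- ===== VERDICT (by name: the statement is the Claim_ definition above) =====
theorem find_least_close_r_spec : Claim_equal_find_least_close_r := by
  intro seq1 seq2 hdom hpre
  clear hdom
  unfold Spec_find_least_close_r
  induction seq1 with
  | nil => cases seq2 <;> rfl
  | cons num rest ih =>
    rcases hpre with h | h
    · simp at h
    · match seq2, h with
      | h2 :: t2, _ =>
        have ih' := ih (Or.inr (by simp : (h2 :: t2 : List Int) ≠ []))
        simp only [find_least_close_r, find_least_close_r_alt] at ih' ⊢
        rw [flc_inner_eq_best, ih', flc_alt_foldl, flc_alt_foldl]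
        simp
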